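-- pv_equiv track=rewrite | github.com/legical/context_sm | drawpic.py | isadd
-- ===== SOURCE A (Python) =====
-- def list_all_index(list,v):
--     # value所有索引的位置
--     v_list = []
--     # value第一次出现的位置
--     i = list.index(v)+1
--     v_list.append(i-1)
--     while i < len(list):
--         if list[i]==v:
--             v_list.append(i)
--         i+=1
--     return v_list
--
-- def isadd(smid,start_time,smids,start_times):
--     if smids.count(smid) < 1 or start_times.count(start_time) < 1:
--         return True
--     else:
--         sm_list = list_all_index(smids,smid)
--         for i in sm_list:
--             if start_times[i] == start_time:
--                 return False
--         return True
-- ===== SOURCE B (Python) =====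
-- def isadd(smid, start_time, smids, start_times):
--     # Pair-membership test: the (smid, start_time) column exists iff that pair
--     # occurs among the zipped (smids, start_times) pairs.
--     return (smid, start_time) not in zip(smids, start_times)
-- ===== Notes on version B (the rewrite author's own statement) =====
-- stated objective: simpler
-- what changed: Replaces the count-guard plus list_all_index index-collection plus scan with a single pair-membership test on zip(smids, start_times), eliminating all explicit loops and indexing.
import Mathlib
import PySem

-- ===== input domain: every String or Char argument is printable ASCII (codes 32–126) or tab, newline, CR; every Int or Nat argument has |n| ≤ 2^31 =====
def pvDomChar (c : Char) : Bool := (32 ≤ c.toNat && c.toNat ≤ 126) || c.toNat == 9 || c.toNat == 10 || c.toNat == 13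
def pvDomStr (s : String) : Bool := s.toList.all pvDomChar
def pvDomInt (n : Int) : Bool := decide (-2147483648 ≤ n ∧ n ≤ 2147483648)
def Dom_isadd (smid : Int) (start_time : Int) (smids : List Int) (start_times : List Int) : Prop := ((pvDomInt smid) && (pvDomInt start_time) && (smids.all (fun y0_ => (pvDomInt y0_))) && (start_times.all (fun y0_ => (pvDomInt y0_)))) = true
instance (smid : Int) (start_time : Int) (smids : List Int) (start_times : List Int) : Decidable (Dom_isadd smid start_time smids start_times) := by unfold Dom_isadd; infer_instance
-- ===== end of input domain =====

-- B replaces A's count-guard + build-all-indices helper + scan with a single pair-membership test on zip(smids, start_times); objective: simpler.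


-- ===== PORT A =====
-- helper list_all_index(list, v): index of first occurrence, then a while-loop collecting the rest.
-- list.index(v) raises ValueError when v ∉ list; isadd only calls it with v ∈ list, so getD 0 is never taken on admitted inputs.
def list_all_index (l : List Int) (v : Int) : List Int :=
  let i : Int := (((PySem.List.index? l v).getD 0 : Nat) : Int) + 1
  let v_list : List Int := [i - 1]
  (PySem.List.pyRange i (l.length : Int) 1).foldl
    (fun acc j => if PySem.List.pyGetD l j 0 = v then acc ++ [j] else acc) v_list

-- the for-loop over sm_list; pyGet? = none is Python's IndexError, excluded by Pre_isadd
def isaddScanA (start_times : List Int) (start_time : Int) : List Int → Bool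
  | [] => true
  | i :: rest =>
    match PySem.List.pyGet? start_times i with
    | none => true   -- IndexError in Python; outside Pre_isadd
    | some v => if v = start_time then false else isaddScanA start_times start_time rest

def isadd (smid : Int) (start_time : Int) (smids : List Int) (start_times : List Int) : Bool :=
  if PySem.List.count smids smid < 1 ∨ PySem.List.count start_times start_time < 1 then true
  else isaddScanA start_times start_time (list_all_index smids smid)

-- ===== PORT B =====
-- Source B: return (smid, start_time) not in zip(smids, start_times)
def isadd_alt (smid : Int) (start_time : Int) (smids : List Int) (start_times : List Int) : Bool :=
  !decide ((smid, start_time) ∈ smids.zip start_times)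

-- ===== PRECONDITION & SPEC =====
-- Pre_ excludes exactly the inputs on which Python A raises IndexError: both values occur, and some index
-- holding smid lies beyond the end of start_times with no earlier (smid, start_time) match to stop the scan first.
def Pre_isadd (smid : Int) (start_time : Int) (smids : List Int) (start_times : List Int) : Prop :=
  smid ∉ smids ∨ start_time ∉ start_times ∨
  ∀ i < smids.length, smids[i]? = some smid → start_times.length ≤ i →
    ∃ j < i, smids[j]? = some smid ∧ start_times[j]? = some start_time
instance (smid : Int) (start_time : Int) (smids : List Int) (start_times : List Int) : Decidable (Pre_isadd smid start_time smids start_times) := by unfold Pre_isadd; infer_instance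

def pvWitness_isadd : Int × Int × List Int × List Int := (1, 2, [1, 3], [2, 2])

def Spec_isadd (smid : Int) (start_time : Int) (smids : List Int) (start_times : List Int) (out : Bool) : Prop := out = isadd_alt smid start_time smids start_times
instance (smid : Int) (start_time : Int) (smids : List Int) (start_times : List Int) (out : Bool) : Decidable (Spec_isadd smid start_time smids start_times out) := by unfold Spec_isadd; infer_instance

-- ===== CLAIM (what is proved, stated in full; the proofs are below) =====
def Claim_equal_isadd : Prop := ∀ (smid : Int) (start_time : Int) (smids : List Int) (start_times : List Int), Dom_isadd smid start_time smids start_times → Pre_isadd smid start_time smids start_times → Spec_isadd smid start_time smids start_times (isadd smid start_time smids start_times)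


-- ===== LEMMAS AND PROOFS =====

-- reference: the increasing list of indices (from offset n) at which l holds v
def midx (v : Int) (n : Int) : List Int → List Int
  | [] => []
  | x :: xs => if x = v then n :: midx v (n + 1) xs else midx v (n + 1) xs

theorem midx_append (v n : Int) (xs ys : List Int) :
    midx v n (xs ++ ys) = midx v n xs ++ midx v (n + xs.length) ys := by
  induction xs generalizing n with
  | nil => simp [midx]
  | cons x xs ih =>
    simp only [List.cons_append, midx, ih (n + 1)]
    split_ifs <;> simp <;> ring_nf

theorem midx_of_not_mem (v n : Int) (xs : List Int) (h : v ∉ xs) : midx v n xs = [] := by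
  induction xs generalizing n with
  | nil => rfl
  | cons x xs ih =>
    simp only [List.mem_cons, not_or] at h
    simp [midx, Ne.symm h.1, ih (n + 1) h.2]

-- the while-loop of list_all_index, read off against midx on the remaining suffix
theorem loopA_eq_midx (l : List Int) (v : Int) (s : List Int) (n : Nat) (init : List Int)
    (hn : n ≤ l.length) (hs : s = l.drop n) :
    (PySem.List.pyRange (n : Int) (l.length : Int) 1).foldl
      (fun acc j => if PySem.List.pyGetD l j 0 = v then acc ++ [j] else acc) init
    = init ++ midx v (n : Int) s := by
  induction s generalizing n init with
  | nil =>
    have : n = l.length := by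
      have := congrArg List.length hs
      simp [List.length_drop] at this
      omega
    subst this
    rw [PySem.List.pyRange_one_eq_nil (by omega)]
    simp [midx]
  | cons x xs ih =>
    have hlt : n < l.length := by
      by_contra h
      rw [List.drop_eq_nil_of_le (by omega)] at hs
      simp at hs
    have hget? : l[n]? = some x := by
      have h0 : (l.drop n)[0]? = l[n + 0]? := List.getElem?_drop
      rw [← hs] at h0
      simpa using h0.symm
    have hgd : PySem.List.pyGetD l (n : Int) 0 = x := by
      rw [PySem.List.pyGetD_natCast]
      simp [List.getD_eq_getElem?_getD, hget?]
    have hdrop : xs = l.drop (n + 1) := by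
      have := congrArg List.tail hs
      simpa [List.tail_drop] using this
    have hcast : ((n : Int) + 1) = ((n + 1 : Nat) : Int) := by push_cast; ring
    rw [PySem.List.pyRange_one_cons (by exact_mod_cast hlt)]
    simp only [List.foldl_cons, hgd]
    by_cases h : x = v
    · rw [if_pos h, hcast, ih (n + 1) (init ++ [(n : Int)]) (by omega) hdrop]
      simp [midx, h, ← hcast]
    · rw [if_neg h, hcast, ih (n + 1) init (by omega) hdrop]
      simp [midx, h, ← hcast]

theorem list_all_index_eq_midx (l : List Int) (v : Int) (h : v ∈ l) :
    list_all_index l v = midx v 0 l := by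
  obtain ⟨k, hk⟩ := Option.isSome_iff_exists.mp ((PySem.List.index?_isSome_iff l v).mpr h)
  obtain ⟨pre, suf, hl, hlen, hvpre⟩ := (PySem.List.index?_eq_some_iff l v k).mp hk
  unfold list_all_index
  rw [hk]
  simp only [Option.getD_some]
  have hkl : k < l.length := by
    rw [hl, List.length_append, List.length_cons, ← hlen]; omega
  have hsuf : l.drop (k + 1) = suf := by
    rw [hl, ← hlen, List.drop_append]
    simp
  have hcast : ((k : Int) + 1 - 1) = (k : Int) := by ring
  have hcast2 : ((k : Int) + 1) = ((k + 1 : Nat) : Int) := by push_cast; ring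
  rw [hcast, hcast2, loopA_eq_midx l v (l.drop (k + 1)) (k + 1) [(k : Int)] (by omega) rfl]
  conv_rhs => rw [hl, midx_append, midx_of_not_mem v 0 pre hvpre]
  rw [hsuf]
  simp only [List.nil_append, zero_add, hlen, midx]
  rw [if_pos trivial, hcast2]
  simp

-- shifting the no-IndexError invariant past a non-matching head
theorem pre_shift (s t x : Int) (xs T : List Int) (n : Nat)
    (hpre : ∀ i < (x :: xs).length, (x :: xs)[i]? = some s → T.length ≤ n + i →
      ∃ j < i, (x :: xs)[j]? = some s ∧ T[n + j]? = some t)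
    (hhead : ¬ (x = s ∧ T[n]? = some t)) :
    ∀ i < xs.length, xs[i]? = some s → T.length ≤ (n + 1) + i →
      ∃ j < i, xs[j]? = some s ∧ T[(n + 1) + j]? = some t := by
  intro i hi hs hT
  obtain ⟨j, hj, hjs, hjt⟩ := hpre (i + 1) (by simpa using Nat.succ_lt_succ hi)
    (by simpa using hs) (by omega)
  match j, hj, hjs, hjt with
  | 0, _, hjs, hjt =>
    have hx : x = s := by simpa using hjs
    exact absurd ⟨hx, by simpa using hjt⟩ hhead
  | k + 1, hj, hjs, hjt =>
    exact ⟨k, by omega, by simpa using hjs, by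
      have : n + (k + 1) = (n + 1) + k := by omega
      rwa [this] at hjt⟩

-- A's scan over the match-index list equals pair-membership in the zipped suffix
theorem scanA_midx_zip (s t : Int) (l T : List Int) (n : Nat)
    (hpre : ∀ i < l.length, l[i]? = some s → T.length ≤ n + i →
      ∃ j < i, l[j]? = some s ∧ T[n + j]? = some t) :
    isaddScanA T t (midx s (n : Int) l) = !decide ((s, t) ∈ l.zip (T.drop n)) := by
  induction l generalizing n with
  | nil => simp [midx, isaddScanA]
  | cons x xs ih =>
    have hcast : ((n : Int) + 1) = ((n + 1 : Nat) : Int) := by push_cast; ring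
    by_cases hn : n < T.length
    · have hdropT : T.drop n = T[n] :: T.drop (n + 1) := (List.getElem_cons_drop hn).symm
      by_cases hx : x = s
      · simp only [midx, if_pos hx, isaddScanA, PySem.List.pyGet?_natCast,
          List.getElem?_eq_getElem hn]
        by_cases ht : T[n] = t
        · rw [if_pos ht, hdropT]
          simp [List.zip_cons_cons, hx, ht]
        · rw [if_neg ht, hcast,
            ih (n + 1) (pre_shift s t x xs T n hpre (by
              rintro ⟨_, h2⟩
              exact ht (by simpa [List.getElem?_eq_getElem hn] using h2)))]
          rw [hdropT, List.zip_cons_cons]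
          apply congrArg
          simp only [decide_eq_decide, List.mem_cons, Prod.mk.injEq]
          constructor
          · exact Or.inr
          · rintro (⟨-, h⟩ | h)
            · exact absurd h.symm ht
            · exact h
      · simp only [midx, if_neg hx]
        rw [hcast, ih (n + 1) (pre_shift s t x xs T n hpre (fun h => hx h.1))]
        rw [hdropT, List.zip_cons_cons]
        apply congrArg
        simp only [decide_eq_decide, List.mem_cons, Prod.mk.injEq]
        constructor
        · exact Or.inr
        · rintro (⟨h, -⟩ | h)
          · exact absurd h.symm hx
          · exact h
    · by_cases hx : x = s
      · obtain ⟨j, hj, -⟩ := hpre 0 (by simp) (by simpa using hx) (by omega)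
        omega
      · simp only [midx, if_neg hx]
        rw [hcast, ih (n + 1) (pre_shift s t x xs T n hpre (fun h => hx h.1))]
        rw [List.drop_eq_nil_of_le (by omega), List.drop_eq_nil_of_le (by omega)]
        simp

theorem count_lt_one_iff (xs : List Int) (v : Int) : PySem.List.count xs v < 1 ↔ v ∉ xs := by
  rw [PySem.List.count_eq]
  constructor
  · intro h hm
    have := List.count_pos_iff.mpr hm
    omega
  · intro h
    simp [List.count_eq_zero_of_not_mem h]

theorem not_mem_zip_of_not_mem (s t : Int) (l T : List Int)
    (h : s ∉ l ∨ t ∉ T) : (s, t) ∉ l.zip T := by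
  intro hm
  rcases List.of_mem_zip hm with ⟨h1, h2⟩
  tauto

-- ===== VERDICT (by name: the statement is the Claim_ definition above) =====
theorem isadd_spec : Claim_equal_isadd := by
  intro smid start_time smids start_times _ hpre
  unfold Spec_isadd isadd isadd_alt
  by_cases h1 : smid ∈ smids
  · by_cases h2 : start_time ∈ start_times
    · have hP : ∀ i < smids.length, smids[i]? = some smid → start_times.length ≤ i →
          ∃ j < i, smids[j]? = some smid ∧ start_times[j]? = some start_time := by
        rcases hpre with h | h | h
        · exact absurd h1 h
        · exact absurd h2 h
        · exact h
      rw [if_neg (by rw [count_lt_one_iff, count_lt_one_iff]; tauto)]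
      rw [list_all_index_eq_midx smids smid h1]
      have := scanA_midx_zip smid start_time smids start_times 0 (by simpa using hP)
      simpa using this
    · rw [if_pos (by rw [count_lt_one_iff, count_lt_one_iff]; tauto)]
      simp [not_mem_zip_of_not_mem smid start_time smids start_times (Or.inr h2)]
  · rw [if_pos (by rw [count_lt_one_iff, count_lt_one_iff]; tauto)]
    simp [not_mem_zip_of_not_mem smid start_time smids start_times (Or.inl h1)]
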